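-- pv_equiv track=rewrite | github.com/nando936/anyDoor | raised panel door OS/Process Incoming Door Orders/True Custom Door Order/extract_tesseract.py | group_by_rows
-- ===== SOURCE A (Python) =====
-- def group_by_rows(elements, y_threshold=15):
--     """Group text elements by row based on y position"""
--     if not elements:
--         return []
--
--     sorted_elements = sorted(elements, key=lambda e: e['y'])
--     rows = []
--     current_row = [sorted_elements[0]]
--
--     for elem in sorted_elements[1:]:
--         if abs(elem['y'] - current_row[0]['y']) < y_threshold:
--             current_row.append(elem)
--         else:
--             rows.append(current_row)
--             current_row = [elem]
--
--     if current_row: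
--         rows.append(current_row)
--
--     return rows
-- ===== SOURCE B (Python) =====
-- def group_by_rows(elements, y_threshold=15):
--     """Group text elements by row based on y position (span-scan decomposition)."""
--     if not elements:
--         return []
--     s = sorted(elements, key=lambda e: e['y'])
--     rows = []
--     i = 0
--     n = len(s)
--     while i < n:
--         anchor = s[i]['y']
--         j = i + 1
--         while j < n and abs(s[j]['y'] - anchor) < y_threshold:
--             j += 1
--         rows.append(s[i:j])
--         i = j
--     return rows
-- ===== Notes on version B (the rewrite author's own statement) =====
-- stated objective: alternative
-- what changed: Replaces A's element-by-element fold carrying a (rows, current_row) accumulator with an index/span scan: for each row start it scans forward to the row's end and emits the whole slice s[i:j] at once (ported as takeWhile/dropWhile recursion).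
import Mathlib
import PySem

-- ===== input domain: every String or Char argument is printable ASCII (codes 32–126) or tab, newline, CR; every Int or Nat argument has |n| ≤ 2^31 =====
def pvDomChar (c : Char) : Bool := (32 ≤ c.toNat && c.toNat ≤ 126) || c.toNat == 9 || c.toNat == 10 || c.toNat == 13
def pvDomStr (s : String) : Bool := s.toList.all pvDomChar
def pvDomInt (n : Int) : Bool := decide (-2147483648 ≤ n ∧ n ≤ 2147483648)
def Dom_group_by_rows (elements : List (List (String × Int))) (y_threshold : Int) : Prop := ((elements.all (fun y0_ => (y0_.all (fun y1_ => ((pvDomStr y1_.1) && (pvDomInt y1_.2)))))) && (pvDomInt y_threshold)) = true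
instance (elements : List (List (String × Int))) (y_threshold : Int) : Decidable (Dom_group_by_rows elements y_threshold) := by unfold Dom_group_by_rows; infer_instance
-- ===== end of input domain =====

-- B is an alternative decomposition: instead of A's fold carrying a (rows, current_row)
-- accumulator, it scans each row as a whole span from its starting element and emits it at once.

-- e['y'] : first-match lookup in the association list (Python dict access; none = KeyError, excluded by Pre_)
def yOf (e : List (String × Int)) : Int := (e.lookup "y").getD 0

-- ===== PORT A =====
-- one fold step of A's for-loop over sorted_elements[1:], state = (rows, current_row)
def gbrStep (t : Int) (st : List (List (List (String × Int))) × List (List (String × Int)))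
    (elem : List (String × Int)) :
    List (List (List (String × Int))) × List (List (String × Int)) :=
  if |yOf elem - yOf (st.2.headD [])| < t then (st.1, st.2 ++ [elem])
  else (st.1 ++ [st.2], [elem])

def group_by_rows (elements : List (List (String × Int))) (y_threshold : Int) :
    List (List (List (String × Int))) :=
  if elements.isEmpty then []
  else
    match PySem.List.sorted elements yOf false with
    | [] => []
    | first :: tail =>
      let st := tail.foldl (gbrStep y_threshold) ([], [first])
      if st.2.isEmpty then st.1 else st.1 ++ [st.2]

-- ===== PORT B =====
-- the outer while loop of B: each step takes the row that starts at the current element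
-- (the inner while j scan = takeWhile / dropWhile on the remainder) and recurses on the rest
def gbrSpans (t : Int) : List (List (String × Int)) → List (List (List (String × Int)))
  | [] => []
  | x :: xs =>
    (x :: xs.takeWhile (fun e => |yOf e - yOf x| < t)) ::
      gbrSpans t (xs.dropWhile (fun e => |yOf e - yOf x| < t))
termination_by l => l.length
decreasing_by
  simpa using Nat.lt_succ_of_le (List.length_dropWhile_le _ _)

def group_by_rows_alt (elements : List (List (String × Int))) (y_threshold : Int) :
    List (List (List (String × Int))) :=
  if elements.isEmpty then []
  else gbrSpans y_threshold (PySem.List.sorted elements yOf false)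

-- ===== PRECONDITION & SPEC =====
-- Pre_ excludes exactly the inputs where Python raises KeyError: some element has no 'y' key.
def Pre_group_by_rows (elements : List (List (String × Int))) (y_threshold : Int) : Prop :=
  ∀ e ∈ elements, (e.lookup "y").isSome
instance (elements : List (List (String × Int))) (y_threshold : Int) : Decidable (Pre_group_by_rows elements y_threshold) := by unfold Pre_group_by_rows; infer_instance

def pvWitness_group_by_rows : (List (List (String × Int))) × Int :=
  ([[("y", 3), ("text", 7)], [("y", 30)], [("y", 5)]], 15)

def Spec_group_by_rows (elements : List (List (String × Int))) (y_threshold : Int) (out : List (List (List (String × Int)))) : Prop := out = group_by_rows_alt elements y_threshold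
instance (elements : List (List (String × Int))) (y_threshold : Int) (out : List (List (List (String × Int)))) : Decidable (Spec_group_by_rows elements y_threshold out) := by unfold Spec_group_by_rows; infer_instance

-- ===== CLAIM (what is proved, stated in full; the proofs are below) =====
def Claim_equal_group_by_rows : Prop := ∀ (elements : List (List (String × Int))) (y_threshold : Int), Dom_group_by_rows elements y_threshold → Pre_group_by_rows elements y_threshold → Spec_group_by_rows elements y_threshold (group_by_rows elements y_threshold)

-- ===== LEMMAS AND PROOFS =====

-- A's loop, started with current_row = c0 :: cs (anchor c0) and accumulated rows,
-- finishes exactly as: rows, then the span of c0, then B's spans of the remainder.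
theorem gbr_loop_eq_spans (t : Int) (xs : List (List (String × Int)))
    (rows : List (List (List (String × Int)))) (c0 : List (String × Int))
    (cs : List (List (String × Int))) :
    (let st := xs.foldl (gbrStep t) (rows, c0 :: cs)
     if st.2.isEmpty then st.1 else st.1 ++ [st.2])
    = rows ++ ((c0 :: (cs ++ xs.takeWhile (fun e => |yOf e - yOf c0| < t))) ::
        gbrSpans t (xs.dropWhile (fun e => |yOf e - yOf c0| < t))) := by
  induction xs generalizing rows c0 cs with
  | nil => simp [gbrSpans]
  | cons x xs ih =>
    by_cases h : |yOf x - yOf c0| < t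
    · simp only [List.foldl_cons, gbrStep, List.headD_cons, h, if_pos, List.takeWhile_cons,
        List.dropWhile_cons, decide_eq_true_eq]
      rw [show (c0 :: cs) ++ [x] = c0 :: (cs ++ [x]) by simp] at *
      rw [ih rows c0 (cs ++ [x])]
      simp
    · simp only [List.foldl_cons, gbrStep, List.headD_cons, h, if_false,
        List.takeWhile_cons, List.dropWhile_cons, decide_eq_true_eq]
      rw [ih (rows ++ [c0 :: cs]) x []]
      simp [gbrSpans]

-- ===== VERDICT (by name: the statement is the Claim_ definition above) =====
theorem group_by_rows_spec : Claim_equal_group_by_rows := by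
  intro elements t _ _
  unfold Spec_group_by_rows group_by_rows group_by_rows_alt
  by_cases he : elements.isEmpty
  · simp [he]
  · simp only [he, if_neg, Bool.false_eq_true, not_false_iff]
    have hne : PySem.List.sorted elements yOf false ≠ [] := by
      intro hnil
      have := PySem.List.sorted_perm (xs := elements) (key := yOf) (rev := false)
      rw [hnil] at this
      simp [List.isEmpty_iff] at he
      exact he (List.Perm.nil_eq this).symm
    cases hs : PySem.List.sorted elements yOf false with
    | nil => exact absurd hs hne
    | cons first tail =>
      have := gbr_loop_eq_spans t tail [] first []
      simpa [gbrSpans] using this
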